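-- pv_equiv track=rewrite | github.com/LaavanyaP/tree | trees.py | SumNodes
-- ===== SOURCE A (Python) =====
-- def SumNodes(l):
--     leafNodeCount = pow(2, l - 1)
--     vec = [[] for i in range(l)]
--     for i in range(1, leafNodeCount + 1):
--         vec[l - 1].append(i)
--     for i in range(l - 2, -1, -1):
--         k = 0
--         while (k < len(vec[i + 1]) - 1):
--             vec[i].append(vec[i + 1][k] +
--                           vec[i + 1][k + 1])
--             k += 2
--     Sum = 0
--     for i in range(l):
--         for j in range(len(vec[i])):
--             Sum += vec[i][j]
--     return Sum
-- ===== SOURCE B (Python) =====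
-- def SumNodes(l):
--     # Each level of the summation tree has the same total, N*(N+1)/2 where
--     # N = 2**(l-1) is the number of leaves; there are l levels.
--     n = pow(2, l - 1)
--     return l * n * (n + 1) // 2
-- ===== Notes on version B (the rewrite author's own statement) =====
-- stated objective: faster
-- what changed: Replaced the explicit construction of every tree level (building and then summing exponentially many node values) with a closed form, since pair-summing preserves each level's total; intended as faster: a timing run saw A time out on most larger probe inputs where B returned, and read B about 132x faster on the one largest input both finished, though too few samples for a confirmed ratio.
import Mathlib
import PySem

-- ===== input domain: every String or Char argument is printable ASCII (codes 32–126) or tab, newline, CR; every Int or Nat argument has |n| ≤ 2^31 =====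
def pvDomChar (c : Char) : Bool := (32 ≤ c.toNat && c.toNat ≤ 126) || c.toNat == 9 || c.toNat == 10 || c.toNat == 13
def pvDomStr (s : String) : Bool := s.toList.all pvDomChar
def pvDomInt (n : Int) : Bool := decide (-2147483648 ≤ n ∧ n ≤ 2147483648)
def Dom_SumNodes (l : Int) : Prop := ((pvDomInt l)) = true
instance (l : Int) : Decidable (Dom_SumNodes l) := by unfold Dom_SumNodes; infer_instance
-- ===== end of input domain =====

-- B replaces A's explicit level-by-level tree construction with a closed form (intended as
-- faster; a timing run saw A time out on most larger inputs where B returned, and read B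
-- about 132x faster on the one largest input both finished — too few samples for a confirmed ratio).

-- ===== PORT A =====
-- the inner 'while k < len(vec[i+1]) - 1' loop of A: it reads src[k] and src[k+1] and steps
-- k by 2, i.e. it consumes the list two elements at a time, so it is ported as the obvious
-- structural recursion; Python's O(1) list.append is ported as cons onto the reversed
-- accumulator, reversed on exit
def pvInner : List Int → List Int → List Int
  | a :: b :: rest, racc => pvInner rest ((a + b) :: racc)
  | _, racc => racc.reverse

def SumNodes (l : Int) : Int :=
  let leafNodeCount : Int := 2 ^ (l - 1).toNat
  let vec0 : List (List Int) := List.replicate l.toNat []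
  -- for i in range(1, leafNodeCount + 1): vec[l-1].append(i)
  let vec1 := vec0.set (l - 1).toNat
      (((PySem.List.pyRange 1 (leafNodeCount + 1) 1).foldl (fun r i => i :: r)
        (vec0.getD (l - 1).toNat []).reverse).reverse)
  -- for i in range(l - 2, -1, -1): while-loop appending into vec[i]
  let vec2 := (PySem.List.pyRange (l - 2) (-1) (-1)).foldl
      (fun vec i =>
        vec.set i.toNat (pvInner (vec.getD (i + 1).toNat []) (vec.getD i.toNat []).reverse)) vec1
  -- Sum = 0; for i in range(l): for j in range(len(vec[i])): Sum += vec[i][j]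
  vec2.foldl (fun s row => row.foldl (· + ·) s) 0

-- ===== PORT B =====
def SumNodes_alt (l : Int) : Int :=
  let n : Int := 2 ^ (l - 1).toNat
  PySem.Int.floordiv (l * n * (n + 1)) 2

-- ===== PRECONDITION & SPEC =====
-- For non-positive l, pow(2, l-1) is a float in Python and A raises TypeError; Pre_ excludes exactly those inputs.
def Pre_SumNodes (l : Int) : Prop := 1 ≤ l
instance (l : Int) : Decidable (Pre_SumNodes l) := by unfold Pre_SumNodes; infer_instance
def pvWitness_SumNodes : Int := (3)
def Spec_SumNodes (l : Int) (out : Int) : Prop := out = SumNodes_alt l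
instance (l : Int) (out : Int) : Decidable (Spec_SumNodes l out) := by unfold Spec_SumNodes; infer_instance

-- ===== CLAIM (what is proved, stated in full; the proofs are below) =====
def Claim_equal_SumNodes : Prop := ∀ (l : Int), Dom_SumNodes l → Pre_SumNodes l → Spec_SumNodes l (SumNodes l)

-- ===== LEMMAS AND PROOFS =====

def pvPairs : List Int → List Int
  | a :: b :: rest => (a + b) :: pvPairs rest
  | _ => []
def pvLevel (N : Int) : Nat → List Int
  | 0 => PySem.List.pyRange 1 (N + 1) 1
  | k + 1 => pvPairs (pvLevel N k)
theorem pvInner_eq : ∀ (src racc : List Int),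
    pvInner src racc = racc.reverse ++ pvPairs src
  | [], racc => by simp [pvInner, pvPairs]
  | [a], racc => by simp [pvInner, pvPairs]
  | a :: b :: rest, racc => by
    rw [show pvInner (a :: b :: rest) racc = pvInner rest ((a + b) :: racc) from rfl,
      pvInner_eq rest ((a + b) :: racc)]
    simp [pvPairs]

theorem pvPairs_sum : ∀ (xs : List Int), xs.length % 2 = 0 → (pvPairs xs).sum = xs.sum
  | [], _ => by simp [pvPairs]
  | [a], h => by simp at h
  | a :: b :: rest, h => by
      have hr : rest.length % 2 = 0 := by simp at h; omega
      simp [pvPairs, pvPairs_sum rest hr]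
      ring

theorem pvPairs_length : ∀ (xs : List Int), (pvPairs xs).length = xs.length / 2
  | [] => by simp [pvPairs]
  | [a] => by simp [pvPairs]
  | a :: b :: rest => by
      simp [pvPairs, pvPairs_length rest]
      omega

theorem pvLevel_length (N : Int) (m : Nat) (hNm : N = 2 ^ m) :
    ∀ k : Nat, k ≤ m → (pvLevel N k).length = 2 ^ (m - k) := by
  intro k
  induction k with
  | zero =>
    intro _
    rw [show pvLevel N 0 = PySem.List.pyRange 1 (N+1) 1 from rfl, PySem.List.length_pyRange_one, hNm]
    rw [show (2:Int)^m + 1 - 1 = ((2^m : Nat) : Int) from by push_cast; ring, Int.toNat_natCast, Nat.sub_zero]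
  | succ k ih =>
    intro hk
    have hev : m - k = (m - (k+1)) + 1 := by omega
    rw [pvLevel, pvPairs_length, ih (by omega), hev, pow_succ, Nat.mul_div_cancel _ (by norm_num)]

theorem pvLevel_sum (N : Int) (m : Nat) (hNm : N = 2 ^ m) :
    ∀ k : Nat, k ≤ m → (pvLevel N k).sum = (pvLevel N 0).sum := by
  intro k
  induction k with
  | zero => intro _; rfl
  | succ k ih =>
    intro hk
    rw [show pvLevel N (k+1) = pvPairs (pvLevel N k) from rfl, pvPairs_sum _ ?_, ih (by omega)]
    rw [pvLevel_length N m hNm k (by omega)]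
    have hev : m - k = (m - (k+1)) + 1 := by omega
    rw [hev, pow_succ]
    omega

theorem pvLevel0_sum (N : Int) (h : 0 ≤ N) :
    2 * (pvLevel N 0).sum = N * (N + 1) := by
  have aux : ∀ t : Nat, 2 * ((List.range t).map (fun k : Nat => (1:Int) + (k:Int))).sum = (t:Int) * (t + 1) := by
    intro t
    induction t with
    | zero => simp
    | succ t ih =>
      rw [List.range_succ]
      simp only [List.map_append, List.map_cons, List.map_nil, List.sum_append, List.sum_cons,
        List.sum_nil]
      push_cast at ih ⊢
      ring_nf at ih ⊢
      omega
  rw [pvLevel, PySem.List.pyRange_one, show N + 1 - 1 = N from by ring]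
  have := aux N.toNat
  rw [Int.toNat_of_nonneg h] at this
  exact this

theorem pvFoldAppend (xs : List Int) : ∀ init : List Int,
    (xs.foldl (fun r i => i :: r) init).reverse = init.reverse ++ xs := by
  induction xs with
  | nil => intro init; simp
  | cons a t ih => intro init; rw [List.foldl_cons, ih]; simp

theorem pvSumRow (row : List Int) : ∀ s : Int, row.foldl (· + ·) s = s + row.sum := by
  induction row with
  | nil => intro s; simp
  | cons a t ih => intro s; simp [List.foldl_cons, ih]; ring

theorem pvSumFold (rows : List (List Int)) : ∀ s : Int,
    rows.foldl (fun s row => row.foldl (· + ·) s) s = s + (rows.map List.sum).sum := by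
  induction rows with
  | nil => intro s; simp
  | cons r t ih =>
    intro s
    rw [List.foldl_cons, pvSumRow, ih]
    simp [List.map_cons]
    ring

theorem pvOuter (N : Int) (m : Nat) : ∀ (j : Nat), j ≤ m → ∀ vec : List (List Int),
    vec.length = m + 1 →
    (∀ i : Nat, i ≤ m → vec.getD i [] = if j ≤ i then pvLevel N (m - i) else []) →
    (((PySem.List.pyRange ((j:Int) - 1) (-1) (-1)).foldl
       (fun vec i => vec.set i.toNat
          (pvInner (vec.getD (i + 1).toNat []) (vec.getD i.toNat []).reverse)) vec).length = m + 1
     ∧ ∀ i : Nat, i ≤ m →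
       ((PySem.List.pyRange ((j:Int) - 1) (-1) (-1)).foldl
         (fun vec i => vec.set i.toNat
            (pvInner (vec.getD (i + 1).toNat []) (vec.getD i.toNat []).reverse)) vec).getD i []
        = pvLevel N (m - i)) := by
  intro j
  induction j with
  | zero =>
    intro _ vec hlen hinv
    rw [show ((0:Nat):Int) - 1 = -1 from by norm_num,
        PySem.List.pyRange_neg_one_eq_nil (by norm_num)]
    refine ⟨hlen, fun i hi => ?_⟩
    simpa using hinv i hi
  | succ j ih =>
    intro hj vec hlen hinv
    rw [show ((j+1:Nat):Int) - 1 = ((j:Nat):Int) from by push_cast; ring,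
        PySem.List.pyRange_neg_one_cons (by omega), List.foldl_cons]
    have hjm : j ≤ m := by omega
    have e1 : ((j:Nat):Int).toNat = j := Int.toNat_natCast j
    have e2 : (((j:Nat):Int) + 1).toNat = j + 1 := by omega
    have hgj : vec.getD j [] = [] := by
      rw [hinv j hjm]; simp
    have hgj1 : vec.getD (j+1) [] = pvLevel N (m - (j+1)) := by
      rw [hinv (j+1) hj]; simp
    have hset : vec.set ((j:Nat):Int).toNat
        (pvInner (vec.getD (((j:Nat):Int) + 1).toNat []) (vec.getD ((j:Nat):Int).toNat []).reverse)
        = vec.set j (pvLevel N (m - j)) := by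
      rw [e1, e2, hgj, hgj1, pvInner_eq, List.reverse_nil, List.reverse_nil, List.nil_append,
        show m - j = (m - (j+1)) + 1 from by omega,
        show pvPairs (pvLevel N (m - (j+1))) = pvLevel N ((m - (j+1)) + 1) from rfl]
    rw [hset]
    apply ih hjm
    · simp [hlen]
    · intro i hi
      rw [List.getD_eq_getElem?_getD, List.getElem?_set]
      by_cases hij : j = i
      · subst hij
        simp [hlen, Nat.lt_succ_of_le hjm]
      · simp only [hij, if_false]
        rw [← List.getD_eq_getElem?_getD, hinv i hi]
        have hiff : (j + 1 ≤ i) ↔ (j ≤ i) := by omega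
        simp only [hiff]

theorem SumNodes_spec' : ∀ (l : Int), 1 ≤ l → SumNodes l = SumNodes_alt l := by
  intro l hl
  obtain ⟨m, hm⟩ : ∃ m : Nat, l = (m:Int) + 1 := ⟨(l-1).toNat, by omega⟩
  subst hm
  have eL : ((m:Int) + 1).toNat = m + 1 := by omega
  have eM : ((m:Int) + 1 - 1).toNat = m := by omega
  simp only [SumNodes, SumNodes_alt, eL, eM]
  set N : Int := 2 ^ m with hN
  have hN0 : 0 ≤ N := by positivity
  have hNm : N = (2:Int) ^ m := rfl
  -- vec1
  rw [pvFoldAppend, List.reverse_reverse]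
  have hvec1 : ∀ i : Nat, i ≤ m →
      ((List.replicate (m+1) ([] : List Int)).set m
        ((List.replicate (m+1) ([] : List Int)).getD m [] ++ PySem.List.pyRange 1 (N + 1) 1)).getD i []
      = if m ≤ i then pvLevel N (m - i) else [] := by
    intro i hi
    rw [List.getD_eq_getElem?_getD, List.getElem?_set]
    by_cases him : m = i
    · subst him
      simp [List.getD_eq_getElem?_getD, pvLevel]
    · have : i < m := by omega
      have h1 : ¬ m ≤ i := by omega
      simp [him, h1, show i < m + 1 from by omega]
  have houter := pvOuter N m m le_rfl
    ((List.replicate (m+1) ([] : List Int)).set m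
      ((List.replicate (m+1) ([] : List Int)).getD m [] ++ PySem.List.pyRange 1 (N + 1) 1))
    (by simp) hvec1
  rw [show (m:Int) + 1 - 2 = ((m:Nat):Int) - 1 from by ring]
  obtain ⟨hlenR, hgetR⟩ := houter
  set R := (PySem.List.pyRange (((m:Nat):Int) - 1) (-1) (-1)).foldl
      (fun vec i => vec.set i.toNat
        (pvInner (vec.getD (i + 1).toNat []) (vec.getD i.toNat []).reverse))
      ((List.replicate (m+1) ([] : List Int)).set m
        ((List.replicate (m+1) ([] : List Int)).getD m [] ++ PySem.List.pyRange 1 (N + 1) 1)) with hR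
  have hRlist : R = (List.range (m+1)).map (fun i => pvLevel N (m - i)) := by
    apply List.ext_getElem
    · simp [hlenR]
    · intro i h1 h2
      have hi : i ≤ m := by rw [hlenR] at h1; omega
      rw [← List.getD_eq_getElem R [] h1, hgetR i hi]
      simp
  rw [pvSumFold, hRlist, List.map_map]
  set S := (pvLevel N 0).sum with hS
  have hconst : ((List.range (m+1)).map (List.sum ∘ fun i => pvLevel N (m - i))) =
      (List.range (m+1)).map (fun _ => S) := by
    apply List.map_congr_left
    intro i hi
    simp only [Function.comp_apply]
    exact pvLevel_sum N m hNm (m - i) (by omega)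
  rw [hconst, PySem.List.sum_map_const_int]
  have h2S : 2 * S = N * (N + 1) := pvLevel0_sum N hN0
  have : ((m:Int) + 1) * N * (N + 1) = 2 * (((m:Int) + 1) * S) := by
    rw [mul_assoc, ← h2S]; ring
  rw [this, PySem.Int.floordiv_eq_ediv_of_pos (by norm_num), Int.mul_ediv_cancel_left _ (by norm_num)]
  simp

-- ===== VERDICT (by name: the statement is the Claim_ definition above) =====
theorem SumNodes_spec : Claim_equal_SumNodes := by
  intro l _ hl
  unfold Spec_SumNodes
  exact SumNodes_spec' l hl
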